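-- pv_equiv track=rewrite | github.com/pypi-data/pypi-mirror-392 | packages/publiplots/publiplots-0.3.0-py3-none-any.whl/publiplots/themes/markers.py | get_marker_cycle
-- ===== SOURCE A (Python) =====
-- from typing import List, Dict, Tuple
--
-- STANDARD_MARKERS: List[str] = [
--     'o',   # Circle
--     's',   # Square
--     '^',   # Triangle up
--     'D',   # Diamond
--     'v',   # Triangle down
--     'p',   # Pentagon
--     '*',   # Star
--     'h',   # Hexagon
--     '<',   # Triangle left
--     '>',   # Triangle right
-- ]
--
-- SIMPLE_MARKERS: List[str] = [
--     'o',   # Circle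
--     's',   # Square
--     '^',   # Triangle up
--     'D',   # Diamond
-- ]
--
-- def get_marker_cycle(n: int, style: str = "standard") -> List[str]:
--     """
--     Get a cycle of n markers from a predefined style.
--
--     Parameters
--     ----------
--     n : int
--         Number of markers needed.
--     style : str, default='standard'
--         Marker style: 'standard' or 'simple'.
--
--     Returns
--     -------
--     List[str]
--         List of n marker codes. If n exceeds available markers,
--         cycles through the list.
--
--     Examples
--     --------
--     >>> markers = get_marker_cycle(5, style='standard')
--     >>> len(markers)
--     5
--     """
--     if style == "standard":
--         marker_set = STANDARD_MARKERS
--     elif style == "simple":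
--         marker_set = SIMPLE_MARKERS
--     else:
--         raise ValueError(f"Unknown marker style '{style}'. Use 'standard' or 'simple'.")
--
--     # Cycle through markers if n exceeds available markers
--     return [marker_set[i % len(marker_set)] for i in range(n)]
-- ===== SOURCE B (Python) =====
-- from typing import List
--
-- STANDARD_MARKERS: List[str] = ['o', 's', '^', 'D', 'v', 'p', '*', 'h', '<', '>']
-- SIMPLE_MARKERS: List[str] = ['o', 's', '^', 'D']
--
-- def get_marker_cycle(n: int, style: str = "standard") -> List[str]:
--     """Cycle of n markers: emit whole copies of the style list, then one partial chunk."""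
--     if style == "standard":
--         marker_set = STANDARD_MARKERS
--     elif style == "simple":
--         marker_set = SIMPLE_MARKERS
--     else:
--         raise ValueError(f"Unknown marker style '{style}'. Use 'standard' or 'simple'.")
--     out: List[str] = []
--     rem = n
--     while rem > 0:
--         if rem >= len(marker_set):
--             out.extend(marker_set)
--             rem -= len(marker_set)
--         else:
--             out.extend(marker_set[:rem])
--             rem = 0
--     return out
-- ===== Notes on version B (the rewrite author's own statement) =====
-- stated objective: alternative
-- what changed: Replaced the per-element modulo-indexed comprehension with a subtraction loop that appends whole copies of the marker list and one final prefix chunk, using no modulo or per-index lookup.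
import Mathlib
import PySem

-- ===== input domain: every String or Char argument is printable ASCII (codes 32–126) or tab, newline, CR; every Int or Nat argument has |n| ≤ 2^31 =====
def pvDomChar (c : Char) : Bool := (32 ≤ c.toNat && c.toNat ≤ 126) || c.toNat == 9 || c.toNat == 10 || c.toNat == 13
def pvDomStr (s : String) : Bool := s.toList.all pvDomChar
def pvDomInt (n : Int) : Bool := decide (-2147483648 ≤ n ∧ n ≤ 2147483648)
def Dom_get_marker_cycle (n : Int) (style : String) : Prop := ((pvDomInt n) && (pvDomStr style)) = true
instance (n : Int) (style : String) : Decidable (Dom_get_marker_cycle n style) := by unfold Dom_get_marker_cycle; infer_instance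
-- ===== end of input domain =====

-- B emits whole copies of the marker list in a subtraction loop plus one final prefix chunk, instead of A's per-index modulo lookup (alternative decomposition, same cost).


def STANDARD_MARKERS : List String := ["o", "s", "^", "D", "v", "p", "*", "h", "<", ">"]
def SIMPLE_MARKERS : List String := ["o", "s", "^", "D"]

-- ===== PORT A =====
def get_marker_cycle (n : Int) (style : String) : List String :=
  let marker_set :=
    if style = "standard" then STANDARD_MARKERS
    else if style = "simple" then SIMPLE_MARKERS
    else []  -- raise ValueError: excluded by Pre_
  (PySem.List.pyRange 0 n 1).map
    (fun i => PySem.List.pyGetD marker_set (PySem.Int.mod i (marker_set.length : Int)) "")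

-- ===== PORT B =====
-- the 'while rem > 0' loop of Source B; hms makes each iteration strictly decrease rem
def cycleChunks (ms : List String) (hms : 0 < ms.length) (out : List String) (rem : Int) : List String :=
  if 0 < rem then
    if (ms.length : Int) ≤ rem then cycleChunks ms hms (out ++ ms) (rem - ms.length)
    else out ++ ms.take rem.toNat
  else out
termination_by rem.toNat
decreasing_by omega

def get_marker_cycle_alt (n : Int) (style : String) : List String :=
  if style = "standard" then cycleChunks STANDARD_MARKERS (by decide) [] n
  else if style = "simple" then cycleChunks SIMPLE_MARKERS (by decide) [] n
  else []  -- raise ValueError: excluded by Pre_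

-- ===== PRECONDITION & SPEC =====
-- Pre_ excludes exactly the styles on which A raises ValueError.
def Pre_get_marker_cycle (n : Int) (style : String) : Prop :=
  style = "standard" ∨ style = "simple"
instance (n : Int) (style : String) : Decidable (Pre_get_marker_cycle n style) := by
  unfold Pre_get_marker_cycle; infer_instance
def pvWitness_get_marker_cycle : Int × String := (7, "simple")

def Spec_get_marker_cycle (n : Int) (style : String) (out : List String) : Prop := out = get_marker_cycle_alt n style
instance (n : Int) (style : String) (out : List String) : Decidable (Spec_get_marker_cycle n style out) := by unfold Spec_get_marker_cycle; infer_instance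

-- ===== CLAIM (what is proved, stated in full; the proofs are below) =====
def Claim_equal_get_marker_cycle : Prop := ∀ (n : Int) (style : String), Dom_get_marker_cycle n style → Pre_get_marker_cycle n style → Spec_get_marker_cycle n style (get_marker_cycle n style)

-- ===== LEMMAS AND PROOFS =====

-- the loop accumulator factors out
theorem cycleChunks_acc (ms : List String) (hms : 0 < ms.length) (rem : Int) (out : List String) :
    cycleChunks ms hms out rem = out ++ cycleChunks ms hms [] rem := by
  suffices h : ∀ k (rem : Int), rem.toNat ≤ k → ∀ out, cycleChunks ms hms out rem = out ++ cycleChunks ms hms [] rem by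
    exact h rem.toNat rem le_rfl out
  intro k
  induction k with
  | zero =>
    intro rem hk out
    have e : ∀ o : List String, cycleChunks ms hms o rem = o := by
      intro o; rw [cycleChunks.eq_def]; simp only [if_neg (show ¬(0:Int) < rem by omega)]
    rw [e out, e []]; simp
  | succ k ih =>
    intro rem hk out
    by_cases h1 : 0 < rem
    · by_cases h2 : (ms.length : Int) ≤ rem
      · have e : ∀ o : List String, cycleChunks ms hms o rem = cycleChunks ms hms (o ++ ms) (rem - ms.length) := by
          intro o; rw [cycleChunks.eq_def]; simp only [if_pos h1, if_pos h2]
        rw [e out, e [], ih (rem - ms.length) (by omega) (out ++ ms), ih (rem - ms.length) (by omega) ([] ++ ms)]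
        simp
      · have e : ∀ o : List String, cycleChunks ms hms o rem = o ++ ms.take rem.toNat := by
          intro o; rw [cycleChunks.eq_def]; simp only [if_pos h1, if_neg h2]
        rw [e out, e []]; simp
    · have e : ∀ o : List String, cycleChunks ms hms o rem = o := by
        intro o; rw [cycleChunks.eq_def]; simp only [if_neg h1]
      rw [e out, e []]; simp

-- first |ms| indices of the modulo map give ms itself
theorem range_mod_map (ms : List String) :
    (List.range ms.length).map (fun i => ms.getD (i % ms.length) "") = ms := by
  apply List.ext_getElem
  · simp
  · intro i h1 h2
    simp at h1
    simp [Nat.mod_eq_of_lt h1, List.getD, List.getElem?_eq_getElem h1]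

-- prefix case: for m < |ms| the modulo map is a take
theorem range_mod_map_take (ms : List String) (m : Nat) (hm : m ≤ ms.length) :
    (List.range m).map (fun i => ms.getD (i % ms.length) "") = ms.take m := by
  apply List.ext_getElem
  · simp [hm]
  · intro i h1 h2
    simp at h1
    have hi : i < ms.length := lt_of_lt_of_le h1 hm
    simp [Nat.mod_eq_of_lt hi, List.getD, List.getElem?_eq_getElem hi]

-- Nat core: per-index modulo lookup over range m equals the chunk loop
theorem cycle_core (ms : List String) (hms : 0 < ms.length) (m : Nat) :
    (List.range m).map (fun i => ms.getD (i % ms.length) "") = cycleChunks ms hms [] (m : Int) := by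
  induction m using Nat.strong_induction_on with
  | _ m ih =>
    rcases Nat.lt_or_ge m ms.length with hlt | hge
    · rcases Nat.eq_zero_or_pos m with h0 | hpos
      · subst h0
        rw [cycleChunks.eq_def, if_neg (by omega)]
        simp
      · rw [cycleChunks.eq_def, if_pos (by omega), if_neg (by omega)]
        simpa using range_mod_map_take ms m (le_of_lt hlt)
    · rw [cycleChunks.eq_def, if_pos (by omega), if_pos (by omega)]
      rw [cycleChunks_acc]
      have hsub : (m : Int) - (ms.length : Int) = ((m - ms.length : Nat) : Int) := by omega
      rw [hsub, ← ih (m - ms.length) (by omega)]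
      have hsplit : m = ms.length + (m - ms.length) := by omega
      conv_lhs => rw [hsplit]
      rw [List.range_add, List.map_append, range_mod_map, List.map_map]
      congr 1
      apply List.map_congr_left
      intro i _
      simp [Nat.add_mod_left]

-- A = B for one concrete nonempty marker list
theorem body_eq (ms : List String) (hms : 0 < ms.length) (n : Int) :
    (PySem.List.pyRange 0 n 1).map
        (fun i => PySem.List.pyGetD ms (PySem.Int.mod i (ms.length : Int)) "") =
      cycleChunks ms hms [] n := by
  rcases (by omega : n ≤ 0 ∨ 0 < n) with hn | hn
  · rw [cycleChunks.eq_def, if_neg (by omega)]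
    simp [PySem.List.pyRange]
    omega
  · obtain ⟨m, rfl⟩ : ∃ m : Nat, n = (m : Int) := ⟨n.toNat, (Int.toNat_of_nonneg (le_of_lt hn)).symm⟩
    rw [PySem.List.pyRange_zero_natCast, List.map_map, ← cycle_core ms hms m]
    apply List.map_congr_left
    intro i _
    show PySem.List.pyGetD ms (PySem.Int.mod (i : Int) (ms.length : Int)) "" = ms.getD (i % ms.length) ""
    rw [PySem.Int.mod_natCast, PySem.List.pyGetD_natCast]

-- ===== VERDICT (by name: the statement is the Claim_ definition above) =====
theorem get_marker_cycle_spec : Claim_equal_get_marker_cycle := by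
  intro n style _ hpre
  unfold Spec_get_marker_cycle get_marker_cycle get_marker_cycle_alt
  rcases hpre with h | h
  · simp only [h]
    exact body_eq STANDARD_MARKERS (by decide) n
  · subst h
    simp only [if_neg (by decide : ¬("simple" = "standard"))]
    exact body_eq SIMPLE_MARKERS (by decide) n
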